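-- pv_equiv track=rewrite | github.com/MrBrantCode/unitest_baseline | mut_generate/mist_train_taco/taco_14668/solution.py | optimize_essay
-- ===== SOURCE A (Python) =====
-- import collections
--
-- def optimize_essay(m, essay, n, synonyms):
--     # Convert all words to lowercase
--     essay = [word.lower() for word in essay]
--     synonyms = [(word1.lower(), word2.lower()) for word1, word2 in synonyms]
--
--     # Create a dictionary to map words to unique indices
--     sti = dict()
--     pack = lambda word: (word.count('r'), len(word), sti.setdefault(word, len(sti)))
--
--     # Create a defaultdict to store edges between synonyms
--     edge = collections.defaultdict(list)
--     nodes = list()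
--
--     # Process each synonym pair
--     for word, synon in synonyms:
--         word_packed = pack(word)
--         synon_packed = pack(synon)
--         edge[synon_packed[-1]].append(word_packed[-1])
--         nodes.append(word_packed)
--         nodes.append(synon_packed)
--
--     # Sort nodes based on the number of 'r's and length
--     nodes.sort()
--
--     # Dictionary to store the best (minimum 'r' count, minimum length) for each node
--     best = dict()
--
--     # Process each node to find the best replacement
--     for node in nodes:
--         if node[2] not in best:
--             stack = [node[2]]
--             while stack:
--                 top = stack.pop()
--                 if top not in best:
--                     best[top] = node[:2]
--                     for n in edge[top]:
--                         if n not in best: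
--                             stack.append(n)
--
--     # Calculate the total 'r' count and length of the optimized essay
--     tr = 0
--     tl = 0
--     for word in essay:
--         if word in sti:
--             wid = sti[word]
--             tr += best[wid][0]
--             tl += best[wid][1]
--         else:
--             tr += word.count('r')
--             tl += len(word)
--
--     return tr, tl
-- ===== SOURCE B (Python) =====
-- def reachable(edge, u):
--     # all ids reachable from u along edge arcs (including u), deterministic BFS by levels
--     seen = [u]
--     frontier = [u]
--     while frontier:
--         nxt = []
--         for x in frontier:
--             for y in edge.get(x, []):
--                 if y not in seen:
--                     seen.append(y)
--                     nxt.append(y)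
--         frontier = nxt
--     return seen
--
--
-- def optimize_essay(m, essay, n, synonyms):
--     essay = [word.lower() for word in essay]
--     synonyms = [(a.lower(), b.lower()) for a, b in synonyms]
--
--     sti = {}
--     pack = lambda word: (word.count('r'), len(word), sti.setdefault(word, len(sti)))
--
--     edge = {}
--     nodes = []
--     for word, synon in synonyms:
--         wp = pack(word)
--         sp = pack(synon)
--         edge.setdefault(sp[2], []).append(wp[2])
--         nodes.append(wp)
--         nodes.append(sp)
--
--     # sort-free multi-source min-relaxation: each node relaxes everything it reaches
--     # with its own (r, len) key; lexicographic tuple min over all ancestors results.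
--     best = {}
--     for r, l, uid in nodes:
--         for v in reachable(edge, uid):
--             cur = best.get(v)
--             if cur is None or (r, l) < cur:
--                 best[v] = (r, l)
--
--     tr = 0
--     tl = 0
--     for word in essay:
--         if word in sti:
--             wid = sti[word]
--             tr += best[wid][0]
--             tl += best[wid][1]
--         else:
--             tr += word.count('r')
--             tl += len(word)
--     return tr, tl
-- ===== Notes on version B (the rewrite author's own statement) =====
-- stated objective: alternative
-- what changed: The sort + first-wins shared-visited DFS propagation is replaced by a sort-free multi-source relaxation: each node runs its own level-by-level BFS over its reachable set and relaxes best[v] with the lexicographic minimum of (r,len).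
import Mathlib
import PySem

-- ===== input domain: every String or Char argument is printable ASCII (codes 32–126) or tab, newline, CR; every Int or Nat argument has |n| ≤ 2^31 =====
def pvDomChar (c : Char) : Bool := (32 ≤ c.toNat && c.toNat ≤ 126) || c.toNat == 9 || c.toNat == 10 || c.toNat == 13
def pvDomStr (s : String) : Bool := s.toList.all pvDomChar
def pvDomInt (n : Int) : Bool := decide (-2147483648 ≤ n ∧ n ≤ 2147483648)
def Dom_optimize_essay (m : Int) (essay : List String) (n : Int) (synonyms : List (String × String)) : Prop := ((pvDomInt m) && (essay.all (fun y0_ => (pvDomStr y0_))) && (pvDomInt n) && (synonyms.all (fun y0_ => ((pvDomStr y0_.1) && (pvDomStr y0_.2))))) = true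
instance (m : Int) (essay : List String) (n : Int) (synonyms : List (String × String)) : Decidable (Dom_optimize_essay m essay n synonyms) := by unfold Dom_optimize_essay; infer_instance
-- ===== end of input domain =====

-- B replaces A's sort + first-wins shared-visited DFS propagation by a sort-free
-- multi-source min-relaxation (per-node BFS over its reachable set); same results.


-- ===== PORT A =====
-- shared setup / summation helpers: these Python lines are identical in A and in B
-- pack = lambda word: (word.count('r'), len(word), sti.setdefault(word, len(sti)))
def pvPack (sti : PySem.Dict String Int) (w : String) : (Int × Int × Int) × PySem.Dict String Int :=
  ((PySem.Str.count w "r", PySem.Str.len w, (sti.get? w).getD (sti.size : Int)),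
   sti.setdefault w (sti.size : Int))

-- body of 'for word, synon in synonyms: …' (A's defaultdict append = modify with default [])
def pvBuildStep (st : PySem.Dict String Int × PySem.Dict Int (List Int) × List (Int × Int × Int))
    (p : String × String) :
    PySem.Dict String Int × PySem.Dict Int (List Int) × List (Int × Int × Int) :=
  let wp := pvPack st.1 p.1
  let sp := pvPack wp.2 p.2
  (sp.2, (st.2.1).modify sp.1.2.2 [] (· ++ [wp.1.2.2]), st.2.2 ++ [wp.1, sp.1])

def pvSetup (syns : List (String × String)) :
    PySem.Dict String Int × PySem.Dict Int (List Int) × List (Int × Int × Int) :=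
  syns.foldl pvBuildStep (PySem.Dict.empty, PySem.Dict.empty, [])

-- body of the final summation loop; best[wid] is total here (every sti id is a key of best)
def pvSumStep (sti : PySem.Dict String Int) (best : PySem.Dict Int (Int × Int))
    (acc : Int × Int) (w : String) : Int × Int :=
  if sti.contains w then
    let wid := sti.getD w 0
    let bv := best.getD wid (0, 0)
    (acc.1 + bv.1, acc.2 + bv.2)
  else (acc.1 + PySem.Str.count w "r", acc.2 + PySem.Str.len w)

-- A-side: Python sorts the (r, len, id) tuples lexicographically
def pvSortKey (nd : Int × Int × Int) : Lex (Int × Lex (Int × Int)) :=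
  toLex (nd.1, toLex (nd.2.1, nd.2.2))

def pvEdgeVals (edge : PySem.Dict Int (List Int)) : List Int := edge.values.flatten

-- termination measure for A's while loop (head of the Lean list = top of the Python stack)
def pvMeasure (edge : PySem.Dict Int (List Int)) (best : PySem.Dict Int (Int × Int))
    (stack : List Int) : Nat :=
  ((stack ++ pvEdgeVals edge).toFinset \ best.keys.toFinset).card * ((pvEdgeVals edge).length + 1)
    + stack.length

lemma pvGetD_sub (edge : PySem.Dict Int (List Int)) (k : Int) :
    ∀ y ∈ edge.getD k [], y ∈ pvEdgeVals edge := by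
  intro y hy
  rw [PySem.Dict.getD_eq_get?_getD] at hy
  cases hg : edge.get? k with
  | none => rw [hg] at hy; simp at hy
  | some l =>
    rw [hg] at hy
    have hit := PySem.Dict.mem_items_of_get?_eq_some _ hg
    have hv : l ∈ edge.values := by
      simp only [PySem.Dict.values]
      exact List.mem_map_of_mem hit
    exact List.mem_flatten.mpr ⟨l, hv, hy⟩

lemma pvGetD_len (edge : PySem.Dict Int (List Int)) (k : Int) :
    (edge.getD k []).length ≤ (pvEdgeVals edge).length := by
  rw [PySem.Dict.getD_eq_get?_getD]
  cases hg : edge.get? k with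
  | none => simp
  | some l =>
    have hit := PySem.Dict.mem_items_of_get?_eq_some _ hg
    have hv : l ∈ edge.values := by
      simp only [PySem.Dict.values]
      exact List.mem_map_of_mem hit
    simp only [Option.getD_some, pvEdgeVals, List.length_flatten]
    exact List.single_le_sum (by simp) _ (List.mem_map_of_mem hv)

lemma pvMeasure_lt_skip (edge : PySem.Dict Int (List Int)) (best : PySem.Dict Int (Int × Int))
    (top : Int) (rest : List Int) :
    pvMeasure edge best rest < pvMeasure edge best (top :: rest) := by
  unfold pvMeasure
  have hsub : (rest ++ pvEdgeVals edge).toFinset \ best.keys.toFinset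
      ⊆ ((top :: rest) ++ pvEdgeVals edge).toFinset \ best.keys.toFinset := by
    refine Finset.sdiff_subset_sdiff ?_ (Finset.Subset.refl _)
    intro z hz; simp at hz ⊢; tauto
  have hc := Finset.card_le_card hsub
  have := Nat.mul_le_mul_right ((pvEdgeVals edge).length + 1) hc
  simp only [List.length_cons]
  omega

lemma pvMeasure_lt_insert (edge : PySem.Dict Int (List Int)) (best : PySem.Dict Int (Int × Int))
    (val : Int × Int) (top : Int) (rest : List Int) (f : Int → Bool)
    (h : best.contains top = false) :
    pvMeasure edge (best.insert top val) ((((edge.getD top []).filter f).reverse) ++ rest)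
      < pvMeasure edge best (top :: rest) := by
  unfold pvMeasure
  set E := pvEdgeVals edge with hE
  set L := E.length with hL
  have hkeys : (best.insert top val).keys = best.keys ++ [top] :=
    PySem.Dict.keys_insert_of_not_contains _ _ h
  have htopmem : top ∉ best.keys := by
    intro hm
    rw [← PySem.Dict.contains_iff_mem_keys] at hm
    simp [hm] at h
  set D := ((top :: rest) ++ E).toFinset \ best.keys.toFinset with hD
  set D' := (((((edge.getD top []).filter f).reverse) ++ rest) ++ E).toFinset
      \ (best.insert top val).keys.toFinset with hD'
  have htopD : top ∈ D := by
    rw [hD]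
    simp [htopmem]
  have hsub : D' ⊆ D.erase top := by
    intro z hz
    rw [hD'] at hz
    simp only [Finset.mem_sdiff, List.mem_toFinset, List.mem_append, List.mem_reverse,
      List.mem_filter, hkeys] at hz
    obtain ⟨hz1, hz2⟩ := hz
    have hzk : z ∉ best.keys ∧ z ≠ top := by
      constructor <;> intro hh <;> apply hz2 <;> simp [hh]
    rw [Finset.mem_erase, hD]
    refine ⟨hzk.2, ?_⟩
    simp only [Finset.mem_sdiff, List.mem_toFinset, List.mem_append, List.mem_cons]
    refine ⟨?_, hzk.1⟩
    rcases hz1 with (⟨hzf, _⟩ | hzr) | hzE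
    · right; exact pvGetD_sub edge top z hzf
    · left; right; exact hzr
    · right; exact hzE
  have hcard : D'.card ≤ D.card - 1 := by
    calc D'.card ≤ (D.erase top).card := Finset.card_le_card hsub
    _ = D.card - 1 := Finset.card_erase_of_mem htopD
  have hDpos : 1 ≤ D.card := Finset.card_pos.mpr ⟨top, htopD⟩ 
  have hpl : (((edge.getD top []).filter f).reverse).length ≤ L := by
    rw [List.length_reverse]
    exact le_trans (List.length_filter_le _ _) (pvGetD_len edge top)
  have h1 : D'.card * (L + 1) ≤ (D.card - 1) * (L + 1) :=
    Nat.mul_le_mul_right _ hcard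
  have h2 : (D.card - 1) * (L + 1) = D.card * (L + 1) - (L + 1) := by
    rw [Nat.sub_mul, one_mul]
  have h3 : L + 1 ≤ D.card * (L + 1) := Nat.le_mul_of_pos_left _ hDpos
  simp only [List.length_append, List.length_cons]
  omega

-- A's inner while loop: pop from the stack, claim unseen nodes with this node's (r, len)
def pvDfs (edge : PySem.Dict Int (List Int)) (val : Int × Int) :
    PySem.Dict Int (Int × Int) → List Int → PySem.Dict Int (Int × Int)
  | best, [] => best
  | best, top :: rest =>
    if best.contains top then pvDfs edge val best rest
    else
      pvDfs edge val (best.insert top val)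
        ((((edge.getD top []).filter (fun y => !((best.insert top val).contains y))).reverse) ++ rest)
termination_by best stack => pvMeasure edge best stack
decreasing_by
  · exact pvMeasure_lt_skip edge best top rest
  · exact pvMeasure_lt_insert edge best val top rest _ (by simpa using ‹¬ best.contains top = true›)

def optimize_essay (m : Int) (essay : List String) (n : Int)
    (synonyms : List (String × String)) : Int × Int :=
  let essay2 := essay.map PySem.Str.lower
  let syns := synonyms.map (fun p => (PySem.Str.lower p.1, PySem.Str.lower p.2))
  let st := pvSetup syns
  let nodesS := PySem.List.sorted st.2.2 pvSortKey false
  let best := nodesS.foldl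
    (fun b nd => if b.contains nd.2.2 then b else pvDfs st.2.1 (nd.1, nd.2.1) b [nd.2.2])
    PySem.Dict.empty
  essay2.foldl (pvSumStep st.1 best) (0, 0)

-- ===== PORT B =====
-- Python tuple comparison (r, len) < cur is lexicographic
def pvLtKey (a b : Int × Int) : Bool := a.1 < b.1 || (a.1 == b.1 && a.2 < b.2)

-- one frontier node of B's BFS round: append unseen successors to seen and to nxt
def pvBfsRound (edge : PySem.Dict Int (List Int)) (p : List Int × List Int) (x : Int) :
    List Int × List Int :=
  (edge.getD x []).foldl (fun q y => if y ∈ q.1 then q else (q.1 ++ [y], q.2 ++ [y])) p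

def pvBfsMeasure (edge : PySem.Dict Int (List Int)) (seen frontier : List Int) : Nat :=
  ((pvEdgeVals edge).toFinset \ seen.toFinset).card * ((pvEdgeVals edge).length + 1)
    + frontier.length

lemma pvInnerFold_inv (adjl : List Int) :
    ∀ (p : List Int × List Int) (s0 : List Int), p.1 = s0 ++ p.2 → p.2.Nodup →
      (∀ y ∈ p.2, y ∉ s0) →
      (adjl.foldl (fun q y => if y ∈ q.1 then q else (q.1 ++ [y], q.2 ++ [y])) p).1
        = s0 ++ (adjl.foldl (fun q y => if y ∈ q.1 then q else (q.1 ++ [y], q.2 ++ [y])) p).2 ∧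
      (adjl.foldl (fun q y => if y ∈ q.1 then q else (q.1 ++ [y], q.2 ++ [y])) p).2.Nodup ∧
      (∀ y ∈ (adjl.foldl (fun q y => if y ∈ q.1 then q else (q.1 ++ [y], q.2 ++ [y])) p).2, y ∉ s0) ∧
      (∀ y ∈ (adjl.foldl (fun q y => if y ∈ q.1 then q else (q.1 ++ [y], q.2 ++ [y])) p).2,
        y ∈ p.2 ∨ y ∈ adjl) ∧
      (∀ y, y ∈ (adjl.foldl (fun q y => if y ∈ q.1 then q else (q.1 ++ [y], q.2 ++ [y])) p).1
        ↔ (y ∈ p.1 ∨ y ∈ adjl)) := by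
  induction adjl with
  | nil => intro p s0 hp hnd hns; simp [hp] at *; exact ⟨hnd, hns⟩
  | cons a l ih =>
    intro p s0 hp hnd hns
    simp only [List.foldl_cons]
    by_cases ha : a ∈ p.1
    · rw [if_pos ha]
      obtain ⟨c1, c2, c3, c4, c5⟩ := ih p s0 hp hnd hns
      refine ⟨c1, c2, c3, ?_, ?_⟩
      · intro y hy; rcases c4 y hy with h | h
        · exact Or.inl h
        · exact Or.inr (List.mem_cons_of_mem _ h)
      · intro y; rw [c5]; simp only [List.mem_cons]
        constructor
        · rintro (h | h); exact Or.inl h; exact Or.inr (Or.inr h)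
        · rintro (h | h | h)
          · exact Or.inl h
          · subst h; exact Or.inl ha
          · exact Or.inr h
    · rw [if_neg ha]
      have hans : a ∉ s0 := fun h => ha (hp ▸ List.mem_append_left _ h)
      have hap2 : a ∉ p.2 := fun h => ha (hp ▸ List.mem_append_right _ h)
      have hp' : (p.1 ++ [a], p.2 ++ [a]).1 = s0 ++ (p.1 ++ [a], p.2 ++ [a]).2 := by
        simp [hp]
      have hnd' : (p.2 ++ [a]).Nodup := by
        rw [List.nodup_append]
        refine ⟨hnd, by simp, ?_⟩
        intro y hy z hz
        simp only [List.mem_singleton] at hz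
        subst hz; intro heq; subst heq; exact hap2 hy
      have hns' : ∀ y ∈ p.2 ++ [a], y ∉ s0 := by
        intro y hy; rcases List.mem_append.mp hy with h | h
        · exact hns y h
        · simp at h; subst h; exact hans
      obtain ⟨c1, c2, c3, c4, c5⟩ := ih _ s0 hp' hnd' hns'
      refine ⟨c1, c2, c3, ?_, ?_⟩
      · intro y hy; rcases c4 y hy with h | h
        · rcases List.mem_append.mp h with h | h
          · exact Or.inl h
          · simp at h; subst h; exact Or.inr (List.mem_cons_self)
        · exact Or.inr (List.mem_cons_of_mem _ h)
      · intro y; rw [c5]; simp only [List.mem_append, List.mem_cons, List.mem_singleton]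
        tauto


lemma pvBfsRound_fold_inv (edge : PySem.Dict Int (List Int)) (fr : List Int) :
    ∀ (p : List Int × List Int) (s0 : List Int), p.1 = s0 ++ p.2 → p.2.Nodup →
      (∀ y ∈ p.2, y ∉ s0) →
      (fr.foldl (pvBfsRound edge) p).1 = s0 ++ (fr.foldl (pvBfsRound edge) p).2 ∧
      (fr.foldl (pvBfsRound edge) p).2.Nodup ∧
      (∀ y ∈ (fr.foldl (pvBfsRound edge) p).2, y ∉ s0) ∧
      (∀ y ∈ (fr.foldl (pvBfsRound edge) p).2, y ∈ p.2 ∨ ∃ x ∈ fr, y ∈ edge.getD x []) ∧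
      (∀ y, y ∈ (fr.foldl (pvBfsRound edge) p).1 ↔ (y ∈ p.1 ∨ ∃ x ∈ fr, y ∈ edge.getD x [])) := by
  induction fr with
  | nil => intro p s0 hp hnd hns; simp; exact ⟨hp, hnd, hns⟩
  | cons x fr ih =>
    intro p s0 hp hnd hns
    simp only [List.foldl_cons]
    obtain ⟨c1, c2, c3, c4, c5⟩ := pvInnerFold_inv (edge.getD x []) p s0 hp hnd hns
    have hR : (edge.getD x []).foldl (fun q y => if y ∈ q.1 then q else (q.1 ++ [y], q.2 ++ [y])) p
        = pvBfsRound edge p x := rfl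
    rw [hR] at c1 c2 c3 c4 c5
    obtain ⟨d1, d2, d3, d4, d5⟩ := ih (pvBfsRound edge p x) s0 c1 c2 c3
    refine ⟨d1, d2, d3, ?_, ?_⟩
    · intro y hy
      rcases d4 y hy with h | ⟨x', hx', hy'⟩
      · rcases c4 y h with h | h
        · exact Or.inl h
        · exact Or.inr ⟨x, List.mem_cons_self, h⟩
      · exact Or.inr ⟨x', List.mem_cons_of_mem _ hx', hy'⟩
    · intro y
      rw [d5 y, c5 y]
      simp only [List.mem_cons]
      constructor
      · rintro ((h | h) | ⟨x', hx', hy'⟩)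
        · exact Or.inl h
        · exact Or.inr ⟨x, Or.inl rfl, h⟩
        · exact Or.inr ⟨x', Or.inr hx', hy'⟩
      · rintro (h | ⟨x', hx' | hx', hy'⟩)
        · exact Or.inl (Or.inl h)
        · subst hx'; exact Or.inl (Or.inr hy')
        · exact Or.inr ⟨x', hx', hy'⟩

lemma pvBfsMeasure_lt (edge : PySem.Dict Int (List Int)) (seen : List Int) (x : Int)
    (fr : List Int) :
    pvBfsMeasure edge ((x :: fr).foldl (pvBfsRound edge) (seen, [])).1
        ((x :: fr).foldl (pvBfsRound edge) (seen, [])).2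
      < pvBfsMeasure edge seen (x :: fr) := by
  obtain ⟨c1, c2, c3, c4, _⟩ := pvBfsRound_fold_inv edge (x :: fr) (seen, []) seen
    (by simp) (by simp) (by simp)
  unfold pvBfsMeasure
  set st := (x :: fr).foldl (pvBfsRound edge) (seen, []) with hst
  set E := (pvEdgeVals edge).toFinset with hEdef
  set L := (pvEdgeVals edge).length with hL
  have hsub : st.2.toFinset ⊆ E \ seen.toFinset := by
    intro z hz
    rw [List.mem_toFinset] at hz
    rw [Finset.mem_sdiff, hEdef, List.mem_toFinset, List.mem_toFinset]
    refine ⟨?_, c3 z hz⟩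
    rcases c4 z hz with h | ⟨x', _, hy'⟩
    · simp at h
    · exact pvGetD_sub edge x' z hy'
  have hcardF : st.2.toFinset.card = st.2.length := List.toFinset_card_of_nodup c2
  have hst1 : st.1.toFinset = seen.toFinset ∪ st.2.toFinset := by
    rw [c1]; simp [List.toFinset_append]
  have hEq : E \ st.1.toFinset = (E \ seen.toFinset) \ st.2.toFinset := by
    rw [hst1]; ext z; simp; tauto
  have hcard : (E \ st.1.toFinset).card = (E \ seen.toFinset).card - st.2.toFinset.card := by
    rw [hEq, Finset.card_sdiff_of_subset hsub]
  have hk : st.2.toFinset.card ≤ (E \ seen.toFinset).card := Finset.card_le_card hsub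
  set c := (E \ seen.toFinset).card with hc
  set k := st.2.toFinset.card with hkdef
  have h1 : (c - k) * (L + 1) = c * (L + 1) - k * (L + 1) := Nat.sub_mul _ _ _
  have h2 : k ≤ k * (L + 1) := Nat.le_mul_of_pos_right _ (by omega)
  have h3 : k * (L + 1) ≤ c * (L + 1) := Nat.mul_le_mul_right _ hk
  rw [hcard]
  simp only [List.length_cons]
  omega

-- B's reachable(edge, u) loop, level by level
def pvBfs (edge : PySem.Dict Int (List Int)) : List Int → List Int → List Int
  | seen, [] => seen
  | seen, x :: fr =>
    pvBfs edge ((x :: fr).foldl (pvBfsRound edge) (seen, [])).1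
      ((x :: fr).foldl (pvBfsRound edge) (seen, [])).2
termination_by seen frontier => pvBfsMeasure edge seen frontier
decreasing_by
  exact pvBfsMeasure_lt edge seen x fr

-- B's relaxation of one reached node v with key k
def pvRelax (k : Int × Int) (b : PySem.Dict Int (Int × Int)) (v : Int) :
    PySem.Dict Int (Int × Int) :=
  if (match b.get? v with | none => true | some cur => pvLtKey k cur)
  then b.insert v k else b

def optimize_essay_alt (m : Int) (essay : List String) (n : Int)
    (synonyms : List (String × String)) : Int × Int :=
  let essay2 := essay.map PySem.Str.lower
  let syns := synonyms.map (fun p => (PySem.Str.lower p.1, PySem.Str.lower p.2))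
  let st := pvSetup syns
  let best := st.2.2.foldl
    (fun b nd => (pvBfs st.2.1 [nd.2.2] [nd.2.2]).foldl (pvRelax (nd.1, nd.2.1)) b)
    PySem.Dict.empty
  essay2.foldl (pvSumStep st.1 best) (0, 0)

-- ===== PRECONDITION & SPEC =====
def Spec_optimize_essay (m : Int) (essay : List String) (n : Int) (synonyms : List (String × String)) (out : Int × Int) : Prop := out = optimize_essay_alt m essay n synonyms
instance (m : Int) (essay : List String) (n : Int) (synonyms : List (String × String)) (out : Int × Int) : Decidable (Spec_optimize_essay m essay n synonyms out) := by unfold Spec_optimize_essay; infer_instance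

-- ===== CLAIM (what is proved, stated in full; the proofs are below) =====
def Claim_equal_optimize_essay : Prop := ∀ (m : Int) (essay : List String) (n : Int) (synonyms : List (String × String)), Dom_optimize_essay m essay n synonyms → Spec_optimize_essay m essay n synonyms (optimize_essay m essay n synonyms)

-- ===== LEMMAS AND PROOFS =====

-- reachability along edge arcs
def pvReach (edge : PySem.Dict Int (List Int)) (u v : Int) : Prop :=
  Relation.ReflTransGen (fun a b => b ∈ edge.getD a []) u v

lemma pvReach_mem_closed (edge : PySem.Dict Int (List Int)) (seen : List Int)
    (hC : ∀ x ∈ seen, ∀ y ∈ edge.getD x [], y ∈ seen) (u v : Int)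
    (h : pvReach edge u v) (hu : u ∈ seen) : v ∈ seen := by
  induction h with
  | refl => exact hu
  | tail h1 step ih => exact hC _ ih _ step

lemma pvBfs_spec (edge : PySem.Dict Int (List Int)) (u : Int) :
    ∀ (seen frontier : List Int),
      (∀ x ∈ frontier, x ∈ seen) →
      (∀ x ∈ seen, x ∈ frontier ∨ ∀ y ∈ edge.getD x [], y ∈ seen) →
      (∀ x ∈ seen, pvReach edge u x) → u ∈ seen →
      ∀ v, v ∈ pvBfs edge seen frontier ↔ pvReach edge u v := by
  intro seen frontier
  fun_induction pvBfs edge seen frontier with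
  | case1 seen =>
    intro _ h2 h3 h4 v
    constructor
    · exact fun hv => h3 v hv
    · intro hr
      refine pvReach_mem_closed edge seen ?_ u v hr h4
      intro x hx
      rcases h2 x hx with h | h
      · simp at h
      · exact h
  | case2 seen x fr ih =>
    intro h1 h2 h3 h4 v
    obtain ⟨c1, _, _, c4, c5⟩ := pvBfsRound_fold_inv edge (x :: fr) (seen, []) seen
      (by simp) (by simp) (by simp)
    apply ih
    · intro z hz
      rw [c1]; exact List.mem_append_right _ hz
    · intro z hz
      rcases List.mem_append.mp (c1 ▸ hz) with hz' | hz'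
      · rcases h2 z hz' with hzf | hcl
        · right; intro y hy
          exact (c5 y).mpr (Or.inr ⟨z, hzf, hy⟩)
        · right; intro y hy
          exact (c5 y).mpr (Or.inl (hcl y hy))
      · left; exact hz'
    · intro z hz
      rcases List.mem_append.mp (c1 ▸ hz) with hz' | hz'
      · exact h3 z hz'
      · rcases c4 z hz' with h | ⟨x', hx', hy'⟩
        · simp at h
        · exact Relation.ReflTransGen.tail (h3 x' (h1 x' hx')) hy'
    · exact (c5 u).mpr (Or.inl h4)

lemma pvBfs_mem (edge : PySem.Dict Int (List Int)) (u v : Int) :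
    v ∈ pvBfs edge [u] [u] ↔ pvReach edge u v := by
  apply pvBfs_spec edge u [u] [u]
  · intro x hx; exact hx
  · intro x hx; left; exact hx
  · intro x hx; simp at hx; subst hx; exact Relation.ReflTransGen.refl
  · simp

-- A's loop invariant: successors of claimed nodes are claimed or still on the stack
def pvInv (edge : PySem.Dict Int (List Int)) (best : PySem.Dict Int (Int × Int))
    (stack : List Int) : Prop :=
  ∀ k, best.contains k = true → ∀ y ∈ edge.getD k [], best.contains y = true ∨ y ∈ stack

lemma pvEscape (edge : PySem.Dict Int (List Int)) (best : PySem.Dict Int (Int × Int))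
    (stack : List Int) (hI : pvInv edge best stack) (v : Int) (hv : best.contains v = false) :
    ∀ x, pvReach edge x v → best.contains x = true → ∃ z ∈ stack, pvReach edge z v := by
  intro x hx
  induction hx using Relation.ReflTransGen.head_induction_on with
  | refl => intro hcv; rw [hv] at hcv; exact absurd hcv (by simp)
  | head h' h ih =>
    intro hca
    rcases hI _ hca _ h' with hcc | hmem
    · exact ih hcc
    · exact ⟨_, hmem, h⟩

lemma pvDfs_get? (edge : PySem.Dict Int (List Int)) (val : Int × Int) :
    ∀ (best : PySem.Dict Int (Int × Int)) (stack : List Int), pvInv edge best stack →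
      (∀ v, best.contains v = true → (pvDfs edge val best stack).get? v = best.get? v) ∧
      (∀ v, best.contains v = false → (∃ x ∈ stack, pvReach edge x v) →
        (pvDfs edge val best stack).get? v = some val) ∧
      (∀ v, best.contains v = false → (¬ ∃ x ∈ stack, pvReach edge x v) →
        (pvDfs edge val best stack).get? v = none) := by
  intro best stack
  fun_induction pvDfs edge val best stack with
  | case1 best =>
    intro _
    refine ⟨fun v _ => rfl, fun v _ h => by simp at h, fun v hv _ => ?_⟩
    exact (PySem.Dict.get?_eq_none_iff_contains _ _).mpr hv
  | case2 best top rest hc ih =>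
    intro hI
    have hI' : pvInv edge best rest := by
      intro k hk y hy
      rcases hI k hk y hy with h | h
      · exact Or.inl h
      · rcases List.mem_cons.mp h with h | h
        · subst h; exact Or.inl hc
        · exact Or.inr h
    obtain ⟨i1, i2, i3⟩ := ih hI'
    refine ⟨i1, ?_, ?_⟩
    · intro v hv ⟨x, hx, hr⟩
      rcases List.mem_cons.mp hx with h | h
      · subst h
        obtain ⟨z, hz, hrz⟩ := pvEscape edge best rest hI' v hv x hr hc
        exact i2 v hv ⟨z, hz, hrz⟩
      · exact i2 v hv ⟨x, h, hr⟩
    · intro v hv hno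
      refine i3 v hv ?_
      rintro ⟨x, hx, hr⟩
      exact hno ⟨x, List.mem_cons_of_mem _ hx, hr⟩
  | case3 best top rest hc ih =>
    intro hI
    have hc' : best.contains top = false := by simpa using hc
    set best' := best.insert top val with hbest'
    set pushes := ((edge.getD top []).filter (fun y => !(best'.contains y))).reverse with hpushes
    have hInv' : pvInv edge best' (pushes ++ rest) := by
      intro k hk y hy
      by_cases hkt : k = top
      · subst hkt
        by_cases hby : best'.contains y = true
        · exact Or.inl hby
        · refine Or.inr (List.mem_append_left _ ?_)
          rw [hpushes, List.mem_reverse, List.mem_filter]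
          exact ⟨hy, by simp [hby]⟩
      · have hkb : best.contains k = true := by
          have hk2 := hk
          rw [hbest', PySem.Dict.contains_insert] at hk2
          simpa [hkt] using hk2
        rcases hI k hkb y hy with h | h
        · refine Or.inl ?_
          rw [hbest', PySem.Dict.contains_insert]
          simp [h]
        · rcases List.mem_cons.mp h with h | h
          · subst h
            exact Or.inl (by rw [hbest']; exact PySem.Dict.contains_insert_self _ _ _)
          · exact Or.inr (List.mem_append_right _ h)
    obtain ⟨i1, i2, i3⟩ := ih hInv'
    have hget' : ∀ w, w ≠ top → best'.get? w = best.get? w := by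
      intro w hw
      rw [hbest', PySem.Dict.get?_insert]
      simp [hw]
    have hcont' : ∀ w, w ≠ top → best'.contains w = best.contains w := by
      intro w hw
      rw [hbest', PySem.Dict.contains_insert]
      simp [hw]
    refine ⟨?_, ?_, ?_⟩
    · intro v hv
      have hvt : v ≠ top := fun h => by rw [h, hc'] at hv; simp at hv
      rw [i1 v (by rw [hcont' v hvt]; exact hv), hget' v hvt]
    · intro v hv ⟨x, hx, hr⟩
      by_cases hvt : v = top
      · subst hvt
        rw [i1 v (by rw [hbest']; exact PySem.Dict.contains_insert_self _ _ _), hbest',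
          PySem.Dict.get?_insert_self]
      · have hv' : best'.contains v = false := by rw [hcont' v hvt]; exact hv
        rcases List.mem_cons.mp hx with h | h
        · subst h
          rcases hr.cases_head with h | ⟨c, hc1, hc2⟩
          · exact absurd h.symm hvt
          · by_cases hbc : best'.contains c = true
            · obtain ⟨z, hz, hrz⟩ := pvEscape edge best' (pushes ++ rest) hInv' v hv' c hc2 hbc
              exact i2 v hv' ⟨z, hz, hrz⟩
            · refine i2 v hv' ⟨c, List.mem_append_left _ ?_, hc2⟩
              rw [hpushes, List.mem_reverse, List.mem_filter]
              exact ⟨hc1, by simp [hbc]⟩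
        · exact i2 v hv' ⟨x, List.mem_append_right _ h, hr⟩
    · intro v hv hno
      have hvt : v ≠ top := by
        intro h; subst h
        exact hno ⟨v, List.mem_cons_self, Relation.ReflTransGen.refl⟩
      have hv' : best'.contains v = false := by rw [hcont' v hvt]; exact hv
      refine i3 v hv' ?_
      rintro ⟨x, hx, hr⟩
      rcases List.mem_append.mp hx with h | h
      · rw [hpushes, List.mem_reverse, List.mem_filter] at h
        exact hno ⟨top, List.mem_cons_self, Relation.ReflTransGen.head h.1 hr⟩
      · exact hno ⟨x, List.mem_cons_of_mem _ h, hr⟩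

-- closedness of best (invariant of A's outer loop between iterations)
def pvClosed (edge : PySem.Dict Int (List Int)) (best : PySem.Dict Int (Int × Int)) : Prop :=
  ∀ k, best.contains k = true → ∀ y ∈ edge.getD k [], best.contains y = true

lemma pvClosed_reach (edge : PySem.Dict Int (List Int)) (best : PySem.Dict Int (Int × Int))
    (hC : pvClosed edge best) (u v : Int) (h : pvReach edge u v)
    (hu : best.contains u = true) : best.contains v = true := by
  induction h with
  | refl => exact hu
  | tail h1 step ih => exact hC _ ih _ step

-- first (r, len) among a node list whose id reaches v
def pvFirstKey (edge : PySem.Dict Int (List Int)) :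
    List (Int × Int × Int) → Int → Option (Int × Int)
  | [], _ => none
  | nd :: rest, v =>
    if v ∈ pvBfs edge [nd.2.2] [nd.2.2] then some (nd.1, nd.2.1) else pvFirstKey edge rest v

lemma pvFoldA_get? (edge : PySem.Dict Int (List Int)) :
    ∀ (l : List (Int × Int × Int)) (best : PySem.Dict Int (Int × Int)), pvClosed edge best →
      ∀ v, (l.foldl (fun b nd => if b.contains nd.2.2 then b
                    else pvDfs edge (nd.1, nd.2.1) b [nd.2.2]) best).get? v
        = if best.contains v then best.get? v else pvFirstKey edge l v := by
  intro l
  induction l with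
  | nil =>
    intro best hC v
    simp only [List.foldl_nil, pvFirstKey]
    by_cases hv : best.contains v
    · rw [if_pos hv]
    · rw [if_neg hv]
      exact (PySem.Dict.get?_eq_none_iff_contains _ _).mpr (by simpa using hv)
  | cons nd l ih =>
    intro best hC v
    simp only [List.foldl_cons]
    by_cases hc : best.contains nd.2.2 = true
    · rw [if_pos hc, ih best hC v]
      by_cases hv : best.contains v = true
      · simp [hv]
      · have hnm : v ∉ pvBfs edge [nd.2.2] [nd.2.2] := by
          intro hmem
          exact absurd (pvClosed_reach edge best hC _ v ((pvBfs_mem edge _ v).mp hmem) hc)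
            (by simp [hv])
        simp [hv, pvFirstKey, hnm]
    · rw [if_neg hc]
      have hc' : best.contains nd.2.2 = false := by simpa using hc
      have hInv : pvInv edge best [nd.2.2] := by
        intro k hk y hy
        exact Or.inl (hC k hk y hy)
      obtain ⟨i1, i2, i3⟩ := pvDfs_get? edge (nd.1, nd.2.1) best [nd.2.2] hInv
      set b1 := pvDfs edge (nd.1, nd.2.1) best [nd.2.2] with hb1
      have hcont : ∀ w, b1.contains w = true ↔
          (best.contains w = true ∨ pvReach edge nd.2.2 w) := by
        intro w
        rw [PySem.Dict.contains_eq_isSome_get?]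
        by_cases hw : best.contains w = true
        · rw [i1 w hw, ← PySem.Dict.contains_eq_isSome_get?, hw]
          simp [hw]
        · have hw' : best.contains w = false := by simpa using hw
          by_cases hr : pvReach edge nd.2.2 w
          · rw [i2 w hw' ⟨nd.2.2, List.mem_cons_self, hr⟩]
            simp [hr]
          · rw [i3 w hw' (by rintro ⟨x, hx, hxr⟩; simp at hx; subst hx; exact hr hxr)]
            simp [hw, hr]
      have hC1 : pvClosed edge b1 := by
        intro k hk y hy
        rcases (hcont k).mp hk with h | h
        · exact (hcont y).mpr (Or.inl (hC k h y hy))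
        · exact (hcont y).mpr (Or.inr (Relation.ReflTransGen.tail h hy))
      rw [ih b1 hC1 v]
      by_cases hv : best.contains v = true
      · have hb1 : b1.contains v = true := (hcont v).mpr (Or.inl hv)
        rw [if_pos hb1, if_pos hv]
        exact i1 v hv
      · have hv' : best.contains v = false := by simpa using hv
        by_cases hm : v ∈ pvBfs edge [nd.2.2] [nd.2.2]
        · have hr := (pvBfs_mem edge _ v).mp hm
          have hb1 : b1.contains v = true := (hcont v).mpr (Or.inr hr)
          rw [if_pos hb1, if_neg hv]
          simp only [pvFirstKey]
          rw [if_pos hm]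
          exact i2 v hv' ⟨nd.2.2, List.mem_cons_self, hr⟩
        · have hr : ¬ pvReach edge nd.2.2 v := fun h => hm ((pvBfs_mem edge _ v).mpr h)
          have hb1 : ¬ b1.contains v = true := by
            intro hk
            rcases (hcont v).mp hk with h | h
            · exact hv h
            · exact hr h
          rw [if_neg hb1, if_neg hv]
          simp only [pvFirstKey]
          rw [if_neg hm]

def pvMinOpt (acc : Option (Int × Int)) (k : Int × Int) : Option (Int × Int) :=
  match acc with
  | none => some k
  | some c => if pvLtKey k c then some k else some c

lemma pvRelaxFold_get? (edge : PySem.Dict Int (List Int)) (k : Int × Int) (S : List Int) :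
    ∀ (b : PySem.Dict Int (Int × Int)) (w : Int),
      (S.foldl (pvRelax k) b).get? w = if w ∈ S then pvMinOpt (b.get? w) k else b.get? w := by
  induction S with
  | nil => intro b w; simp
  | cons x S ih =>
    intro b w
    have hirr : ∀ c : Int × Int, pvLtKey c c = false := by
      intro c; simp [pvLtKey]
    have hstep : (pvRelax k b x).get? w = if w = x then pvMinOpt (b.get? w) k else b.get? w := by
      cases hbx : b.get? x with
      | none =>
        have hrel : pvRelax k b x = b.insert x k := by
          simp [pvRelax, hbx]
        rw [hrel, PySem.Dict.get?_insert]
        by_cases hwx : w = x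
        · subst hwx; simp [hbx, pvMinOpt]
        · simp [hwx]
      | some cur =>
        by_cases hlt : pvLtKey k cur = true
        · have hrel : pvRelax k b x = b.insert x k := by
            simp [pvRelax, hbx, hlt]
          rw [hrel, PySem.Dict.get?_insert]
          by_cases hwx : w = x
          · subst hwx; simp [hbx, pvMinOpt, hlt]
          · simp [hwx]
        · have hrel : pvRelax k b x = b := by
            simp [pvRelax, hbx, hlt]
          rw [hrel]
          by_cases hwx : w = x
          · subst hwx; simp [hbx, pvMinOpt, hlt]
          · simp [hwx]
    have hidem : ∀ a, pvMinOpt (pvMinOpt a k) k = pvMinOpt a k := by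
      intro a
      cases a with
      | none => simp [pvMinOpt, hirr]
      | some c =>
        simp only [pvMinOpt]
        by_cases hlt : pvLtKey k c = true
        · simp [hlt, hirr]
        · simp [hlt]
    simp only [List.foldl_cons]
    rw [ih]
    by_cases hwS : w ∈ S
    · rw [if_pos hwS, hstep, if_pos (List.mem_cons_of_mem _ hwS)]
      by_cases hwx : w = x
      · rw [if_pos hwx, hidem]
      · rw [if_neg hwx]
    · rw [if_neg hwS, hstep]
      by_cases hwx : w = x
      · rw [if_pos hwx, if_pos (by simp [hwx])]
      · rw [if_neg hwx, if_neg (by simp [hwx, hwS])]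

def pvMin (edge : PySem.Dict Int (List Int)) (l : List (Int × Int × Int)) (v : Int)
    (acc : Option (Int × Int)) : Option (Int × Int) :=
  l.foldl (fun acc nd => if v ∈ pvBfs edge [nd.2.2] [nd.2.2]
           then pvMinOpt acc (nd.1, nd.2.1) else acc) acc

lemma pvFoldB_get? (edge : PySem.Dict Int (List Int)) :
    ∀ (l : List (Int × Int × Int)) (b : PySem.Dict Int (Int × Int)) (v : Int),
      (l.foldl (fun b nd => (pvBfs edge [nd.2.2] [nd.2.2]).foldl (pvRelax (nd.1, nd.2.1)) b) b).get? v
        = pvMin edge l v (b.get? v) := by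
  intro l
  induction l with
  | nil => intro b v; simp [pvMin]
  | cons nd l ih =>
    intro b v
    simp only [List.foldl_cons, pvMin]
    rw [ih, pvRelaxFold_get? edge (nd.1, nd.2.1)]
    rfl

-- order-free characterisation of the two results
def pvIsMinAt (edge : PySem.Dict Int (List Int)) (l : List (Int × Int × Int)) (v : Int)
    (o : Option (Int × Int)) : Prop :=
  (o = none ∧ ∀ nd ∈ l, v ∉ pvBfs edge [nd.2.2] [nd.2.2]) ∨
  (∃ k, o = some k ∧ (∃ nd ∈ l, v ∈ pvBfs edge [nd.2.2] [nd.2.2] ∧ (nd.1, nd.2.1) = k) ∧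
    ∀ nd ∈ l, v ∈ pvBfs edge [nd.2.2] [nd.2.2] → pvLtKey (nd.1, nd.2.1) k = false)

lemma pvIsMinAt_unique (edge : PySem.Dict Int (List Int)) (l : List (Int × Int × Int)) (v : Int)
    (o₁ o₂ : Option (Int × Int)) (h₁ : pvIsMinAt edge l v o₁) (h₂ : pvIsMinAt edge l v o₂) :
    o₁ = o₂ := by
  have hanti : ∀ a b : Int × Int, pvLtKey a b = false → pvLtKey b a = false → a = b := by
    intro a b ha hb
    obtain ⟨a1, a2⟩ := a
    obtain ⟨b1, b2⟩ := b
    simp [pvLtKey] at ha hb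
    simp only [Prod.mk.injEq]
    omega
  rcases h₁ with ⟨e₁, hn₁⟩ | ⟨k₁, e₁, ⟨nd₁, hm₁, hr₁, hk₁⟩, hmin₁⟩ <;>
    rcases h₂ with ⟨e₂, hn₂⟩ | ⟨k₂, e₂, ⟨nd₂, hm₂, hr₂, hk₂⟩, hmin₂⟩
  · rw [e₁, e₂]
  · exact absurd hr₂ (hn₁ nd₂ hm₂)
  · exact absurd hr₁ (hn₂ nd₁ hm₁)
  · rw [e₁, e₂]
    have ha2 := hmin₁ nd₂ hm₂ hr₂
    have hb2 := hmin₂ nd₁ hm₁ hr₁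
    rw [hk₂] at ha2
    rw [hk₁] at hb2
    exact congrArg some (hanti k₁ k₂ hb2 ha2)

lemma pvIsMinAt_perm (edge : PySem.Dict Int (List Int)) {l l' : List (Int × Int × Int)}
    (hp : l.Perm l') (v : Int) (o : Option (Int × Int)) (h : pvIsMinAt edge l v o) :
    pvIsMinAt edge l' v o := by
  rcases h with ⟨e, hn⟩ | ⟨k, e, ⟨nd, hm, hr, hk⟩, hmin⟩
  · exact Or.inl ⟨e, fun nd hnd => hn nd (hp.mem_iff.mpr hnd)⟩
  · exact Or.inr ⟨k, e, ⟨nd, hp.mem_iff.mp hm, hr, hk⟩,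
      fun nd hnd => hmin nd (hp.mem_iff.mpr hnd)⟩

lemma pvMin_sat (edge : PySem.Dict Int (List Int)) (v : Int) :
    ∀ (l pre : List (Int × Int × Int)) (acc : Option (Int × Int)),
      pvIsMinAt edge pre v acc → pvIsMinAt edge (pre ++ l) v (pvMin edge l v acc) := by
  intro l
  induction l with
  | nil => intro pre acc h; simpa [pvMin] using h
  | cons nd l ih =>
    intro pre acc h
    have hstep : pvIsMinAt edge (pre ++ [nd]) v
        (if v ∈ pvBfs edge [nd.2.2] [nd.2.2] then pvMinOpt acc (nd.1, nd.2.1) else acc) := by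
      by_cases hm : v ∈ pvBfs edge [nd.2.2] [nd.2.2]
      · rw [if_pos hm]
        rcases h with ⟨e, hn⟩ | ⟨k, e, ⟨nd', hm', hr', hk'⟩, hmin⟩
        · subst e
          refine Or.inr ⟨(nd.1, nd.2.1), rfl, ⟨nd, by simp, hm, rfl⟩, ?_⟩
          intro nd' hnd' hr'
          rcases List.mem_append.mp hnd' with h' | h'
          · exact absurd hr' (hn nd' h')
          · simp at h'; subst h'; simp [pvLtKey]
        · subst e
          simp only [pvMinOpt]
          by_cases hlt : pvLtKey (nd.1, nd.2.1) k = true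
          · rw [if_pos hlt]
            refine Or.inr ⟨(nd.1, nd.2.1), rfl, ⟨nd, by simp, hm, rfl⟩, ?_⟩
            intro nd'' hnd'' hr''
            rcases List.mem_append.mp hnd'' with h' | h'
            · have := hmin nd'' h' hr''
              simp [pvLtKey] at this hlt ⊢
              omega
            · simp at h'; subst h'; simp [pvLtKey]
          · rw [if_neg hlt]
            refine Or.inr ⟨k, rfl, ⟨nd', List.mem_append_left _ hm', hr', hk'⟩, ?_⟩
            intro nd'' hnd'' hr''
            rcases List.mem_append.mp hnd'' with h' | h'
            · exact hmin nd'' h' hr''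
            · simp at h'; subst h'; simpa using hlt
      · rw [if_neg hm]
        rcases h with ⟨e, hn⟩ | ⟨k, e, ⟨nd', hm', hr', hk'⟩, hmin⟩
        · refine Or.inl ⟨e, ?_⟩
          intro nd' hnd'
          rcases List.mem_append.mp hnd' with h' | h'
          · exact hn nd' h'
          · simp at h'; subst h'; exact hm
        · refine Or.inr ⟨k, e, ⟨nd', List.mem_append_left _ hm', hr', hk'⟩, ?_⟩
          intro nd'' hnd'' hr''
          rcases List.mem_append.mp hnd'' with h' | h'
          · exact hmin nd'' h' hr''
          · simp at h'; subst h'; exact absurd hr'' hm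
    have := ih (pre ++ [nd]) _ hstep
    simpa [pvMin, List.append_assoc] using this

lemma pvFirstKey_sat (edge : PySem.Dict Int (List Int)) (v : Int) :
    ∀ (l : List (Int × Int × Int)),
      l.Pairwise (fun a b => pvSortKey a ≤ pvSortKey b) →
      pvIsMinAt edge l v (pvFirstKey edge l v) := by
  have hkey : ∀ a b : Int × Int × Int, pvSortKey a ≤ pvSortKey b →
      pvLtKey (b.1, b.2.1) (a.1, a.2.1) = false := by
    intro a b h
    rw [pvSortKey, pvSortKey] at h
    simp only [Prod.Lex.le_iff, ofLex_toLex] at h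
    simp only [pvLtKey, Bool.or_eq_false_iff, Bool.and_eq_false_iff, decide_eq_false_iff_not,
      beq_eq_false_iff_ne, ne_eq]
    omega
  intro l
  induction l with
  | nil => intro _; exact Or.inl ⟨rfl, by simp⟩
  | cons nd l ih =>
    intro hpw
    have hpw' := List.Pairwise.of_cons hpw
    have hhead : ∀ y ∈ l, pvSortKey nd ≤ pvSortKey y := by
      intro y hy
      exact List.rel_of_pairwise_cons hpw hy
    simp only [pvFirstKey]
    by_cases hm : v ∈ pvBfs edge [nd.2.2] [nd.2.2]
    · rw [if_pos hm]
      refine Or.inr ⟨(nd.1, nd.2.1), rfl, ⟨nd, List.mem_cons_self, hm, rfl⟩, ?_⟩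
      intro nd' hnd' _
      rcases List.mem_cons.mp hnd' with h' | h'
      · subst h'; simp [pvLtKey]
      · exact hkey nd nd' (hhead nd' h')
    · rw [if_neg hm]
      rcases ih hpw' with ⟨e, hn⟩ | ⟨k, e, ⟨nd', hm', hr', hk'⟩, hmin⟩
      · refine Or.inl ⟨e, ?_⟩
        intro nd' hnd'
        rcases List.mem_cons.mp hnd' with h' | h'
        · subst h'; exact hm
        · exact hn nd' h'
      · refine Or.inr ⟨k, e, ⟨nd', List.mem_cons_of_mem _ hm', hr', hk'⟩, ?_⟩
        intro nd'' hnd'' hr''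
        rcases List.mem_cons.mp hnd'' with h' | h'
        · subst h'; exact absurd hr'' hm
        · exact hmin nd'' h' hr'' 

-- best-dicts of the two ports agree on every lookup
lemma pvBest_agree (edge : PySem.Dict Int (List Int)) (nodes : List (Int × Int × Int)) (v : Int) :
    ((PySem.List.sorted nodes pvSortKey false).foldl
        (fun b nd => if b.contains nd.2.2 then b else pvDfs edge (nd.1, nd.2.1) b [nd.2.2])
        PySem.Dict.empty).get? v
      = (nodes.foldl
          (fun b nd => (pvBfs edge [nd.2.2] [nd.2.2]).foldl (pvRelax (nd.1, nd.2.1)) b)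
          PySem.Dict.empty).get? v := by
  have hCempty : pvClosed edge (PySem.Dict.empty : PySem.Dict Int (Int × Int)) := by
    intro k hk
    rw [PySem.Dict.contains_empty] at hk
    simp at hk
  rw [pvFoldA_get? edge _ _ hCempty v, pvFoldB_get? edge nodes _ v,
    PySem.Dict.get?_empty, if_neg (by rw [PySem.Dict.contains_empty]; simp)]
  have hA := pvFirstKey_sat edge v (PySem.List.sorted nodes pvSortKey false)
    (PySem.List.sorted_pairwise nodes pvSortKey)
  have hB := pvMin_sat edge v nodes [] none (Or.inl ⟨rfl, by simp⟩)
  simp only [List.nil_append] at hB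
  exact pvIsMinAt_unique edge _ v _ _ hA
    (pvIsMinAt_perm edge (PySem.List.sorted_perm nodes pvSortKey false).symm v _ hB)

lemma pvSum_congr (sti : PySem.Dict String Int) (bA bB : PySem.Dict Int (Int × Int))
    (h : ∀ v, bA.get? v = bB.get? v) (es : List String) (init : Int × Int) :
    es.foldl (pvSumStep sti bA) init = es.foldl (pvSumStep sti bB) init := by
  have hstep : pvSumStep sti bA = pvSumStep sti bB := by
    funext acc w
    simp only [pvSumStep, PySem.Dict.getD_eq_get?_getD, h]
  rw [hstep]

-- ===== VERDICT (by name: the statement is the Claim_ definition above) =====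
theorem optimize_essay_spec : Claim_equal_optimize_essay := by
  intro m essay n synonyms _
  show optimize_essay m essay n synonyms = optimize_essay_alt m essay n synonyms
  unfold optimize_essay optimize_essay_alt
  apply pvSum_congr
  apply pvBest_agree
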